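-- pv_equiv track=rewrite | github.com/zhouhaosame/leetcode_zh | offer/机器人的运动范围_13.py | range_of_motion_of_robert
-- ===== SOURCE A (Python) =====
-- def range_of_motion_of_robert(board):
--     if not board:
--         return None
--     row_len, col_len, num, k = len(board), len(board), set(), 13
--     """可以用ans存储所有的路径，然后将里面的格子并集，就得到了所有的范围"""
--     def check_point(row, col):
--         sum_row, sum_col = 0, 0
--         while (row):
--             sum_row += row % 10
--             row = row // 10
--         while (col):
--             sum_col += col % 10
--             col = col // 10
--         return sum_row + sum_col
--
--     def backtracking(i, j, visited):
--         if not check_point(i, j) < k: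
--             return
--         else:
--             #num=num | set([(i, j)])
--             """这里很重要的啊，因为，虽然感觉num好像会一直增加，但是其实回溯的时候，num也会回到上一阶段，为什么呢？？？？？
--             因为
--             num重新赋值了啊，num有了一个新的地址，老的num地址被存储在栈中，然后返回上一级会回到那个老的地址的，这样就造成了
--             num的"回溯"。
--             正确的方法是直接在地址里改变内容
--
--             原来我定义了一个count计数器，没进入一次就count++，这样是错误的，因为这个思路是当前i,j是(2,2),然后延伸出来(2,3)
--             ,(2,4)这一条路，visited中是(2,2),(2,3),(2,4)。然后，count=count+2.然后我回溯，这时候，visited中只有(2,2)了，然后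
--             新的路径可能会和上一条路径有重复的格子。所以count会多很多
--             """
--             num.add((i, j))
--             for (a, b) in [(a, b) for (a, b) in [(i - 1, j), (i + 1, j), (i, j - 1), (i, j + 1)] if
--                            0 <= a < row_len and 0 <= b < col_len and (a, b) not in visited]:
--                 visited.add((i, j))#！！！！！！！！！！！和平常不一样
--                 backtracking(a, b, visited)##！！！！！！！！！！！！
--                 """这里又有一个小技巧，原来的是backtracking(a, b, visited| set([(i,j)]),相当于将所有的路径都求出来了，
--                 不是相当于2的m*n次方条路径，因为比如九宫格，周围都不是路径的一份子，则中间的不可能是是路径的一份子。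
--                 这样很浪费时间，非常浪费。
--                 但是将每次迭代遍历过的都保留，这就相当于给格子染上黑色。最终只要是有路径能够到达的地方，都会被染成黑色"""
--     backtracking(0, 0, set())
--     return len(num)
-- ===== SOURCE B (Python) =====
-- def range_of_motion_of_robert(board):
--     if not board:
--         return None
--     n = len(board)
--
--     def digit_sum(x):
--         return 0 if x <= 0 else x % 10 + digit_sum(x // 10)
--
--     seen = {(0, 0)}
--     stack = [(0, 0)]
--     count = 0
--     while stack:
--         i, j = stack.pop()
--         if digit_sum(i) + digit_sum(j) < 13:
--             count += 1
--             for nb in ((i - 1, j), (i + 1, j), (i, j - 1), (i, j + 1)):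
--                 a, b = nb
--                 if 0 <= a < n and 0 <= b < n and nb not in seen:
--                     seen.add(nb)
--                     stack.append(nb)
--     return count
-- ===== Notes on version B (the rewrite author's own statement) =====
-- stated objective: alternative
-- what changed: replaced the recursive backtracking DFS (shared mutated visited set, cells re-entered several times, neighbour list rebuilt by a comprehension in every call) by an iterative flood fill with an explicit stack that marks each cell in a seen set once at push time and counts it once at pop time
import Mathlib
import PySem

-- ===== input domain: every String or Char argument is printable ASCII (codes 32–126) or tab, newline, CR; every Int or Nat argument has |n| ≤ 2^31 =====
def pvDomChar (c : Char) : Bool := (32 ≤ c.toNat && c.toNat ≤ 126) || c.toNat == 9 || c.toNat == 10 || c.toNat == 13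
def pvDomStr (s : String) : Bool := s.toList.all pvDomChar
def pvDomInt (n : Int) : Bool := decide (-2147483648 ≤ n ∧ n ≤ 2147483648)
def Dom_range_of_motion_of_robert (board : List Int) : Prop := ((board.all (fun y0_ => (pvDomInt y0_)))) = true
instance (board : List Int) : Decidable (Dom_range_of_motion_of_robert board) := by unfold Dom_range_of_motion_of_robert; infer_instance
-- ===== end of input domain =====

-- B replaces A's recursive backtracking DFS (shared mutated visited set, cells re-entered, neighbour
-- list rebuilt per call) by an iterative flood fill with an explicit stack that marks each cell once
-- at push time and counts it once at pop time; same return value on every input.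

-- ===== PORT A =====

theorem div10_toNat_lt {x : Int} (h : 0 < x) :
    (PySem.Int.floordiv x 10).toNat < x.toNat := by
  rw [PySem.Int.floordiv_eq_ediv_of_pos (by norm_num)]
  omega

-- check_point's `while (row):` loop (Python tests row ≠ 0; in this program row/col are always ≥ 0,
-- where `0 < x` is the same test and makes the port total).
def pyDigitLoop (x sum : Int) : Int :=
  if h : 0 < x then pyDigitLoop (PySem.Int.floordiv x 10) (sum + PySem.Int.mod x 10) else sum
termination_by x.toNat
decreasing_by
  exact div10_toNat_lt h

-- check_point(row, col): sum_row loop, sum_col loop, return sum_row + sum_col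
def checkPointA (row col : Int) : Int := pyDigitLoop row 0 + pyDigitLoop col 0

abbrev Cell := Int × Int
abbrev StA := PySem.Set Cell × PySem.Set Cell   -- (num, visited)

-- the literal neighbour list [(i-1,j),(i+1,j),(i,j-1),(i,j+1)] of A's comprehension
def nbrsOf (c : Cell) : List Cell := [(c.1 - 1, c.2), (c.1 + 1, c.2), (c.1, c.2 - 1), (c.1, c.2 + 1)]

def inbP (n : Int) (c : Cell) : Prop := 0 ≤ c.1 ∧ c.1 < n ∧ 0 ≤ c.2 ∧ c.2 < n
def okC (c : Cell) : Prop := checkPointA c.1 c.2 < 13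

-- cells reachable from (0,0) through in-bounds cells of digit-sum < 13 (proof-carrying invariant of both ports)
inductive Reach (n : Int) : Cell → Prop where
  | base : inbP n ((0 : Int), (0 : Int)) → okC ((0 : Int), (0 : Int)) → Reach n ((0 : Int), (0 : Int))
  | step {c d : Cell} : Reach n c → d ∈ nbrsOf c → inbP n d → okC d → Reach n d

def Closed1 (n : Int) (c : Cell) (N : List Cell) : Prop :=
  ∀ d ∈ nbrsOf c, inbP n d → okC d → d ∈ N

def InvA (n : Int) (st : StA) : Prop :=
  (∀ c ∈ st.2, c ∈ st.1) ∧ (∀ c ∈ st.1, Reach n c) ∧ st.1.Nodup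

-- termination measure: grid cells not yet visited
def gridL (n : Int) : List Cell :=
  (PySem.List.pyRange 0 n 1).product (PySem.List.pyRange 0 n 1)

def gcount (n : Int) (v : List Cell) : Nat := List.countP (fun c => decide (c ∉ v)) (gridL n)

theorem mem_gridL {n : Int} {c : Cell} : c ∈ gridL n ↔ inbP n c := by
  obtain ⟨a, b⟩ := c
  simp only [gridL, List.pair_mem_product, PySem.List.mem_pyRange_one, inbP]
  tauto

theorem countP_lt {α : Type} {l : List α} {p q : α → Bool}
    (hpq : ∀ x ∈ l, p x = true → q x = true) {y : α} (hy : y ∈ l)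
    (hpy : p y = false) (hqy : q y = true) : List.countP p l < List.countP q l := by
  obtain ⟨l1, l2, rfl⟩ := List.append_of_mem hy
  rw [List.countP_append, List.countP_append, List.countP_cons, List.countP_cons, hpy, hqy]
  have m1 : List.countP p l1 ≤ List.countP q l1 :=
    List.countP_mono_left (fun x hx => hpq x (by simp [hx]))
  have m2 : List.countP p l2 ≤ List.countP q l2 :=
    List.countP_mono_left (fun x hx => hpq x (by simp [hx]))
  simp only [Bool.false_eq_true, if_false, if_true]
  omega

theorem gcount_mono {n : Int} {v w : List Cell} (h : v ⊆ w) : gcount n w ≤ gcount n v := by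
  apply List.countP_mono_left
  intro c _ hc
  simp only [decide_eq_true_eq] at hc ⊢
  exact fun hv => hc (h hv)

theorem gcount_strict {n : Int} {v w : List Cell} {y : Cell} (hvw : v ⊆ w) (hyw : y ∈ w)
    (hyv : y ∉ v) (hy : inbP n y) : gcount n w < gcount n v := by
  refine countP_lt ?_ (mem_gridL.mpr hy) (by simp [hyw]) (by simp [hyv])
  intro c _ hc
  simp only [decide_eq_true_eq] at hc ⊢
  exact fun hv => hc (hvw hv)

theorem subset_add {α : Type} [BEq α] [LawfulBEq α] {s : PySem.Set α} {x : α} :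
    s ⊆ PySem.Set.add s x :=
  fun a ha => (PySem.Set.mem_add s x a).mpr (Or.inl ha)

-- the comprehension's filtered neighbour list
def nbrListA (n : Int) (v : PySem.Set Cell) (x : Cell) : List Cell :=
  (nbrsOf x).filter (fun c =>
    decide (0 ≤ c.1) && decide (c.1 < n) && decide (0 ≤ c.2) && decide (c.2 < n) &&
      !(PySem.Set.contains v c))

theorem mem_nbrListA {n : Int} {v : PySem.Set Cell} {x c : Cell} :
    c ∈ nbrListA n v x ↔ c ∈ nbrsOf x ∧ inbP n c ∧ c ∉ v := by
  simp [nbrListA, inbP, List.mem_filter, and_assoc]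

theorem ok_zero : okC ((0 : Int), (0 : Int)) := by
  show checkPointA 0 0 < 13
  rw [checkPointA]
  rw [pyDigitLoop]
  norm_num

theorem inb_zero {board : List Int} (hb : ¬ board = []) :
    inbP (board.length : Int) ((0 : Int), (0 : Int)) := by
  have h : 0 < board.length := List.length_pos_iff.mpr hb
  refine ⟨le_refl 0, ?_, le_refl 0, ?_⟩ <;>
    · show (0 : Int) < (board.length : Int)
      exact_mod_cast h

theorem invA_empty (n : Int) : InvA n (PySem.Set.empty, PySem.Set.empty) :=
  ⟨by simp [PySem.Set.empty], by simp [PySem.Set.empty], by simp [PySem.Set.empty]⟩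

-- bundled pre/postconditions of the verified ports (kept as named Props so the
-- well-founded packaging stays small)
def HypA (n : Int) (x : Cell) (st : StA) : Prop :=
  inbP n x ∧ (okC x → Reach n x) ∧ InvA n st

def PostA (n : Int) (x : Cell) (st st' : StA) : Prop :=
  st.1 ⊆ st'.1 ∧ st.2 ⊆ st'.2 ∧ InvA n st' ∧ (okC x → x ∈ st'.1) ∧
    ∀ c ∈ st'.1, c ∈ st.1 ∨ Closed1 n c st'.1

def HypG (n : Int) (x : Cell) (V0 : PySem.Set Cell) (l : List Cell) (cur : StA) : Prop :=
  inbP n x ∧ Reach n x ∧ V0 ⊆ cur.2 ∧ x ∈ cur.1 ∧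
    (∀ c ∈ l, c ∈ nbrsOf x ∧ inbP n c ∧ c ∉ V0) ∧ InvA n cur

def PostG (n : Int) (l : List Cell) (cur st' : StA) : Prop :=
  cur.1 ⊆ st'.1 ∧ cur.2 ⊆ st'.2 ∧ InvA n st' ∧ (∀ c ∈ l, okC c → c ∈ st'.1) ∧
    ∀ c ∈ st'.1, c ∈ cur.1 ∨ Closed1 n c st'.1

theorem mkHypG_top {n : Int} {x : Cell} {st : StA} (h : HypA n x st)
    (hok : checkPointA x.1 x.2 < 13) :
    HypG n x st.2 (nbrListA n st.2 x) (PySem.Set.add st.1 x, st.2) := by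
  obtain ⟨hx, hrx, hinv⟩ := h
  refine ⟨hx, hrx hok, fun _ ha => ha,
    (PySem.Set.mem_add st.1 x x).mpr (Or.inr rfl),
    fun c hc => mem_nbrListA.mp hc,
    fun c hc => subset_add (hinv.1 c hc), fun c hc => ?_, PySem.Set.nodup_add _ _ hinv.2.2⟩
  rcases (PySem.Set.mem_add st.1 x c).mp hc with hcm | rfl
  · exact hinv.2.1 c hcm
  · exact hrx hok

theorem btA_wrap {n : Int} {x : Cell} {st rv : StA} (h : HypA n x st)
    (hr : PostG n (nbrListA n st.2 x) (PySem.Set.add st.1 x, st.2) rv) :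
    PostA n x st rv := by
  obtain ⟨_, _, hinv⟩ := h
  obtain ⟨h1, h2, h3, h4, h5⟩ := hr
  refine ⟨fun a ha => h1 (subset_add ha), h2, h3,
    fun _ => h1 ((PySem.Set.mem_add st.1 x x).mpr (Or.inr rfl)), ?_⟩
  intro c hc
  rcases h5 c hc with hin | hcl
  · rcases (PySem.Set.mem_add st.1 x c).mp hin with hcm | heq
    · exact Or.inl hcm
    · refine Or.inr (fun d hd hdin hdok => ?_)
      by_cases hdv : d ∈ st.2
      · exact h1 (subset_add (hinv.1 d hdv))
      · exact h4 d (mem_nbrListA.mpr ⟨heq ▸ hd, hdin, hdv⟩) hdok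
  · exact Or.inr hcl

theorem btA_else {n : Int} {x : Cell} {st : StA} (h : HypA n x st)
    (hok : ¬ checkPointA x.1 x.2 < 13) : PostA n x st st :=
  ⟨fun _ ha => ha, fun _ ha => ha, h.2.2, fun hk => absurd hk hok, fun c hc => Or.inl hc⟩

theorem goA_nil {n : Int} {x : Cell} {V0 : PySem.Set Cell} {cur : StA}
    (h : HypG n x V0 [] cur) : PostG n [] cur cur :=
  ⟨fun _ ha => ha, fun _ ha => ha, h.2.2.2.2.2, by simp, fun c hc => Or.inl hc⟩

theorem mkHypA_step {n : Int} {x b : Cell} {V0 : PySem.Set Cell} {rest : List Cell} {cur : StA}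
    (h : HypG n x V0 (b :: rest) cur) : HypA n b (cur.1, PySem.Set.add cur.2 x) := by
  obtain ⟨hx, hRx, hsub, hxn, hl, hinv⟩ := h
  obtain ⟨hbn, hbin, hbV0⟩ := hl b List.mem_cons_self
  refine ⟨hbin, fun hob => Reach.step hRx hbn hbin hob, fun c hc => ?_, hinv.2.1, hinv.2.2⟩
  rcases (PySem.Set.mem_add cur.2 x c).mp hc with hcm | rfl
  · exact hinv.1 c hcm
  · exact hxn

theorem mkHypG_rest {n : Int} {x b : Cell} {V0 : PySem.Set Cell} {rest : List Cell}
    {cur rv : StA} (h : HypG n x V0 (b :: rest) cur)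
    (hr : PostA n b (cur.1, PySem.Set.add cur.2 x) rv) : HypG n x V0 rest rv := by
  obtain ⟨hx, hRx, hsub, hxn, hl, hinv⟩ := h
  obtain ⟨h1, h2, h3, _, _⟩ := hr
  exact ⟨hx, hRx, fun a ha => h2 (subset_add (hsub ha)), h1 hxn,
    fun c hc => hl c (List.mem_cons_of_mem b hc), h3⟩

theorem goA_wrap {n : Int} {x b : Cell} {V0 : PySem.Set Cell} {rest : List Cell}
    {cur rv rv2 : StA} (h : HypG n x V0 (b :: rest) cur)
    (hb : PostA n b (cur.1, PySem.Set.add cur.2 x) rv) (hg : PostG n rest rv rv2) :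
    PostG n (b :: rest) cur rv2 := by
  obtain ⟨hb1, hb2, _, hb4, hb5⟩ := hb
  obtain ⟨hg1, hg2, hg3, hg4, hg5⟩ := hg
  refine ⟨fun a ha => hg1 (hb1 ha), fun a ha => hg2 (hb2 (subset_add ha)), hg3, ?_, ?_⟩
  · intro c hc hok
    rcases List.mem_cons.mp hc with rfl | hc'
    · exact hg1 (hb4 hok)
    · exact hg4 c hc' hok
  · intro c hc
    rcases hg5 c hc with hcm | hcl
    · rcases hb5 c hcm with h' | hcl'
      · exact Or.inl h'
      · exact Or.inr (fun d hd hdi hdo => hg1 (hcl' d hd hdi hdo))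
    · exact Or.inr hcl

theorem goA_dec_main {n : Int} {x b : Cell} {V0 : PySem.Set Cell} {rest : List Cell}
    {cur : StA} (h : HypG n x V0 (b :: rest) cur) :
    2 * gcount n (PySem.Set.add cur.2 x) + (if b ∈ PySem.Set.add cur.2 x then 1 else 0) <
      2 * gcount n V0 + (if x ∈ V0 then 1 else 0) := by
  obtain ⟨hx, _, hsub, _, hl, _⟩ := h
  obtain ⟨_, hbin, hbV0⟩ := hl b List.mem_cons_self
  by_cases hxv : x ∈ V0
  · have hadd : PySem.Set.add cur.2 x = cur.2 := PySem.Set.add_of_mem (hsub hxv)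
    simp only [hadd, if_pos hxv]
    by_cases hbc : b ∈ cur.2
    · have h1 := gcount_strict hsub hbc hbV0 hbin
      split_ifs <;> omega
    · simp only [if_neg hbc]
      have h2 := gcount_mono (n := n) hsub
      omega
  · simp only [if_neg hxv]
    have h1 : gcount n (PySem.Set.add cur.2 x) < gcount n V0 :=
      gcount_strict (fun a ha => subset_add (hsub ha))
        ((PySem.Set.mem_add _ _ _).mpr (Or.inr rfl)) hxv hx
    split_ifs <;> omega

-- backtracking(i, j, visited), state (num, visited) threaded; goA is its `for (a,b) in [...]` loop.
mutual
def btA (n : Int) (x : Cell) (st : StA) (h : HypA n x st) : {st' : StA // PostA n x st st'} :=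
  if hok : checkPointA x.1 x.2 < 13 then
    -- num.add((i,j)); then the for-loop over the comprehension list
    let r := goA n x st.2 (nbrListA n st.2 x) (PySem.Set.add st.1 x, st.2) (mkHypG_top h hok)
    ⟨r.val, btA_wrap h r.property⟩
  else
    ⟨st, btA_else h hok⟩
termination_by (2 * gcount n st.2 + (if x ∈ st.2 then 1 else 0), (nbrListA n st.2 x).length + 1)
decreasing_by
  all_goals exact Prod.Lex.right _ (Nat.lt_succ_self _)

def goA (n : Int) (x : Cell) (V0 : PySem.Set Cell) (l : List Cell) (cur : StA)
    (h : HypG n x V0 l cur) : {st' : StA // PostG n l cur st'} :=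
  match l with
  | [] => ⟨cur, goA_nil h⟩
  | b :: rest =>
    -- visited.add((i,j)); backtracking(a, b, visited); continue the loop
    let r := btA n b (cur.1, PySem.Set.add cur.2 x) (mkHypA_step h)
    let r2 := goA n x V0 rest r.val (mkHypG_rest h r.property)
    ⟨r2.val, goA_wrap h r.property r2.property⟩
termination_by (2 * gcount n V0 + (if x ∈ V0 then 1 else 0), l.length)
decreasing_by
  all_goals first
    | exact Prod.Lex.right _ (Nat.lt_succ_self _)
    | exact Prod.Lex.left _ _ (goA_dec_main h)
end

def range_of_motion_of_robert (board : List Int) : Option Int :=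
  if hb : board = [] then none
  else
    -- row_len = col_len = len(board), k = 13; num = set(); backtracking(0, 0, set()); return len(num)
    some (PySem.Set.len
      (btA (board.length : Int) ((0 : Int), (0 : Int)) (PySem.Set.empty, PySem.Set.empty)
        ⟨inb_zero hb, fun _ => Reach.base (inb_zero hb) ok_zero, invA_empty _⟩).val.1)

-- ===== PORT B =====

-- digit_sum(x) = 0 if x <= 0 else x % 10 + digit_sum(x // 10)
def dsB (x : Int) : Int :=
  if h : 0 < x then PySem.Int.mod x 10 + dsB (PySem.Int.floordiv x 10) else 0
termination_by x.toNat
decreasing_by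
  exact div10_toNat_lt h

-- the tuple ((i-1,j),(i+1,j),(i,j-1),(i,j+1))
def nbrsB (i j : Int) : List Cell := [(i - 1, j), (i + 1, j), (i, j - 1), (i, j + 1)]

-- body of the for-loop: if in bounds and unseen, mark seen and push
def stepB (n : Int) (st : List Cell × PySem.Set Cell) (nb : Cell) : List Cell × PySem.Set Cell :=
  if 0 ≤ nb.1 ∧ nb.1 < n ∧ 0 ≤ nb.2 ∧ nb.2 < n ∧ nb ∉ st.2 then
    (st.1 ++ [nb], PySem.Set.add st.2 nb)
  else st

theorem pop?_append {α : Type} (rest : List α) (c : α) :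
    PySem.List.pop? (rest ++ [c]) = some (c, rest) := by
  have hl : (rest ++ [c]).length = rest.length + 1 := by simp
  simp only [PySem.List.pop?, PySem.List.pyIdx?, hl]
  norm_num
  rw [List.eraseIdx_append_of_length_le (le_refl _)]
  simp

theorem pop?_some {α : Type} {stack : List α} {c : α} {rest : List α}
    (h : PySem.List.pop? stack = some (c, rest)) : stack = rest ++ [c] := by
  induction stack using List.reverseRecOn with
  | nil => simp [PySem.List.pop?, PySem.List.pyIdx?] at h
  | append_singleton ys y _ =>
    rw [pop?_append] at h
    obtain ⟨rfl, rfl⟩ := by simpa using h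
    rfl

theorem foldB_measure (n : Int) (l : List Cell) : ∀ st : List Cell × PySem.Set Cell,
    2 * gcount n (l.foldl (stepB n) st).2 + (l.foldl (stepB n) st).1.length ≤
      2 * gcount n st.2 + st.1.length := by
  induction l with
  | nil => intro st; simp
  | cons a t ih =>
    intro st
    rw [List.foldl_cons]
    refine le_trans (ih _) ?_
    by_cases h : 0 ≤ a.1 ∧ a.1 < n ∧ 0 ≤ a.2 ∧ a.2 < n ∧ a ∉ st.2
    · simp only [stepB, if_pos h]
      have h1 : gcount n (PySem.Set.add st.2 a) < gcount n st.2 :=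
        gcount_strict subset_add ((PySem.Set.mem_add _ _ _).mpr (Or.inr rfl)) h.2.2.2.2
          ⟨h.1, h.2.1, h.2.2.1, h.2.2.2.1⟩
      simp only [List.length_append, List.length_cons, List.length_nil]
      omega
    · simp only [stepB, if_neg h]
      exact le_refl _

theorem loopB_dec_ok {n : Int} {c : Cell} {rest : List Cell} {seen : PySem.Set Cell} :
    2 * gcount n ((nbrsB c.1 c.2).foldl (stepB n) (rest, seen)).2 +
        ((nbrsB c.1 c.2).foldl (stepB n) (rest, seen)).1.length <
      2 * gcount n seen + (rest ++ [c]).length := by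
  have hm := foldB_measure n (nbrsB c.1 c.2) (rest, seen)
  simp only [List.length_append, List.length_cons, List.length_nil] at *
  omega

theorem loopB_dec_no {n : Int} {c : Cell} {rest : List Cell} {seen : PySem.Set Cell} :
    2 * gcount n seen + rest.length < 2 * gcount n seen + (rest ++ [c]).length := by
  simp only [List.length_append, List.length_cons, List.length_nil]
  omega

-- while stack: (i,j) = stack.pop(); if digit_sum(i)+digit_sum(j) < 13: count += 1; push fresh in-bounds neighbours
def loopB (n : Int) (stack : List Cell) (seen : PySem.Set Cell) (count : Int) : Int :=
  match hpop : PySem.List.pop? stack with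
  | none => count
  | some (c, rest) =>
    if dsB c.1 + dsB c.2 < 13 then
      let fs := (nbrsB c.1 c.2).foldl (stepB n) (rest, seen)
      loopB n fs.1 fs.2 (count + 1)
    else loopB n rest seen count
termination_by 2 * gcount n seen + stack.length
decreasing_by
  · rw [pop?_some hpop]
    exact loopB_dec_ok
  · rw [pop?_some hpop]
    exact loopB_dec_no

def range_of_motion_of_robert_alt (board : List Int) : Option Int :=
  if board = [] then none
  else
    -- n = len(board); seen = {(0,0)}; stack = [(0,0)]; count = 0; while-loop; return count
    some (loopB (board.length : Int) [((0 : Int), (0 : Int))]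
      (PySem.Set.ofList [((0 : Int), (0 : Int))]) 0)

-- ===== PRECONDITION & SPEC =====
def Spec_range_of_motion_of_robert (board : List Int) (out : Option Int) : Prop := out = range_of_motion_of_robert_alt board
instance (board : List Int) (out : Option Int) : Decidable (Spec_range_of_motion_of_robert board out) := by unfold Spec_range_of_motion_of_robert; infer_instance

-- ===== CLAIM (what is proved, stated in full; the proofs are below) =====
def Claim_equal_range_of_motion_of_robert : Prop := ∀ (board : List Int), Dom_range_of_motion_of_robert board → Spec_range_of_motion_of_robert board (range_of_motion_of_robert board)

-- ===== LEMMAS AND PROOFS =====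

theorem reach_ok {n : Int} {c : Cell} (h : Reach n c) : okC c := by
  cases h with
  | base _ h2 => exact h2
  | step _ _ _ h4 => exact h4

theorem pyDigitLoop_eq_dsB : ∀ (x s : Int), 0 ≤ x → pyDigitLoop x s = s + dsB x := by
  intro x s
  induction x, s using pyDigitLoop.induct with
  | case1 x s hpos ih =>
    intro _
    rw [pyDigitLoop, dsB, dif_pos hpos, dif_pos hpos]
    have hnn : 0 ≤ PySem.Int.floordiv x 10 := by
      rw [PySem.Int.floordiv_eq_ediv_of_pos (by norm_num)]
      omega
    rw [ih hnn]
    ring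
  | case2 x s hpos =>
    intro _
    rw [pyDigitLoop, dsB, dif_neg hpos, dif_neg hpos]
    ring

theorem okC_iff {i j : Int} (hi : 0 ≤ i) (hj : 0 ≤ j) :
    (dsB i + dsB j < 13) ↔ okC (i, j) := by
  unfold okC checkPointA
  rw [pyDigitLoop_eq_dsB i 0 hi, pyDigitLoop_eq_dsB j 0 hj]
  omega

theorem pop?_none {α : Type} {stack : List α}
    (h : PySem.List.pop? stack = none) : stack = [] := by
  induction stack using List.reverseRecOn with
  | nil => rfl
  | append_singleton ys y _ => rw [pop?_append] at h; cases h

theorem foldB_spec (n : Int) (l : List Cell) : ∀ st : List Cell × PySem.Set Cell,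
    ∃ new : List Cell, l.foldl (stepB n) st = (st.1 ++ new, st.2 ++ new) ∧ new.Nodup ∧
      (∀ d ∈ new, d ∉ st.2 ∧ inbP n d ∧ d ∈ l) ∧ (∀ d ∈ l, inbP n d → d ∈ st.2 ++ new) := by
  induction l with
  | nil => intro st; exact ⟨[], by simp, by simp, by simp, by simp⟩
  | cons a t ih =>
    intro st
    rw [List.foldl_cons]
    by_cases h : 0 ≤ a.1 ∧ a.1 < n ∧ 0 ≤ a.2 ∧ a.2 < n ∧ a ∉ st.2
    · obtain ⟨new, heq, hnd, hprop, hcompl⟩ := ih (st.1 ++ [a], PySem.Set.add st.2 a)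
      have hadd : PySem.Set.add st.2 a = st.2 ++ [a] := PySem.Set.add_of_not_mem h.2.2.2.2
      rw [hadd] at heq hprop hcompl
      simp only [stepB, if_pos h]
      rw [hadd, heq]
      refine ⟨a :: new, ?_, ?_, ?_, ?_⟩
      · simp
      · refine List.nodup_cons.mpr ⟨fun hmem => ?_, hnd⟩
        have := (hprop a hmem).1
        simp at this
      · intro d hd
        rcases List.mem_cons.mp hd with rfl | hd'
        · exact ⟨h.2.2.2.2, ⟨h.1, h.2.1, h.2.2.1, h.2.2.2.1⟩, List.mem_cons_self ..⟩
        · obtain ⟨hd1, hd2, hd3⟩ := hprop d hd'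
          exact ⟨fun hds => hd1 (by simp [hds]), hd2, List.mem_cons_of_mem _ hd3⟩
      · intro d hd hdi
        rcases List.mem_cons.mp hd with rfl | hd'
        · simp
        · have := hcompl d hd' hdi
          simpa using this
    · simp only [stepB, if_neg h]
      obtain ⟨new, heq, hnd, hprop, hcompl⟩ := ih st
      refine ⟨new, heq, hnd,
        fun d hd => ⟨(hprop d hd).1, (hprop d hd).2.1, List.mem_cons_of_mem _ (hprop d hd).2.2⟩, ?_⟩
      intro d hd hdi
      rcases List.mem_cons.mp hd with rfl | hd'
      · have hdmem : d ∈ st.2 := by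
          by_contra hds
          exact h ⟨hdi.1, hdi.2.1, hdi.2.2.1, hdi.2.2.2, hds⟩
        exact List.mem_append_left _ hdmem
      · exact hcompl d hd' hdi

theorem filter_length_flip {R : List Cell} (p q : Cell → Bool) (hnd : R.Nodup) (c : Cell)
    (hc : c ∈ R) (hpc : p c = true) (hqc : q c = false)
    (hother : ∀ e ∈ R, e ≠ c → p e = q e) :
    (R.filter p).length = (R.filter q).length + 1 := by
  induction R with
  | nil => cases hc
  | cons a t ih =>
    rcases List.mem_cons.mp hc with rfl | hct
    · have hat : c ∉ t := (List.nodup_cons.mp hnd).1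
      rw [List.filter_cons, List.filter_cons, hpc, hqc]
      have : t.filter p = t.filter q := by
        apply List.filter_congr
        intro e he
        exact hother e (List.mem_cons_of_mem _ he) (fun hea => hat (hea ▸ he))
      simp [this]
    · rw [List.filter_cons, List.filter_cons]
      have hac : a ≠ c := fun hea => (List.nodup_cons.mp hnd).1 (hea ▸ hct)
      have hpa : p a = q a := hother a (List.mem_cons_self ..) hac
      have ihh := ih (List.nodup_cons.mp hnd).2 hct
        (fun e he hec => hother e (List.mem_cons_of_mem _ he) hec)
      rw [hpa]
      by_cases hqa : q a = true
      · simp [hqa, ihh]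
      · simp at hqa
        simp [hqa, ihh]

theorem nbrsB_eq (c : Cell) : nbrsB c.1 c.2 = nbrsOf c := rfl

def IB (n : Int) (stack : List Cell) (seen : PySem.Set Cell) : Prop :=
  stack.Nodup ∧ (∀ c ∈ stack, c ∈ seen) ∧ seen.Nodup ∧ ((0 : Int), (0 : Int)) ∈ seen ∧
  (∀ c ∈ seen, inbP n c ∧ (okC c → Reach n c)) ∧
  (∀ c ∈ seen, c ∉ stack → okC c → Closed1 n c seen)

theorem reach_mem_closed {n : Int} {seen : List Cell}
    (h0 : ((0 : Int), (0 : Int)) ∈ seen)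
    (hcl : ∀ c ∈ seen, okC c → Closed1 n c seen) :
    ∀ c, Reach n c → c ∈ seen := by
  intro c h
  induction h with
  | base _ _ => exact h0
  | step hr hnb hinb hok ih => exact hcl _ ih (reach_ok hr) _ hnb hinb hok

theorem loopB_pop_none {n : Int} {stack : List Cell} {seen : PySem.Set Cell} {count : Int}
    (h : PySem.List.pop? stack = none) : loopB n stack seen count = count := by
  rw [loopB.eq_def]
  split
  · rfl
  · next heq => rw [h] at heq; cases heq

theorem loopB_pop_ok {n : Int} {stack : List Cell} {seen : PySem.Set Cell} {count : Int}
    {c : Cell} {rest : List Cell} (h : PySem.List.pop? stack = some (c, rest))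
    (hds : dsB c.1 + dsB c.2 < 13) :
    loopB n stack seen count =
      loopB n ((nbrsB c.1 c.2).foldl (stepB n) (rest, seen)).1
        ((nbrsB c.1 c.2).foldl (stepB n) (rest, seen)).2 (count + 1) := by
  rw [loopB.eq_def]
  split
  · next heq => rw [h] at heq; cases heq
  · next c' rest' heq =>
    rw [h] at heq
    obtain ⟨rfl, rfl⟩ := by simpa using heq
    rw [if_pos hds]

theorem loopB_pop_no {n : Int} {stack : List Cell} {seen : PySem.Set Cell} {count : Int}
    {c : Cell} {rest : List Cell} (h : PySem.List.pop? stack = some (c, rest))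
    (hds : ¬ (dsB c.1 + dsB c.2 < 13)) :
    loopB n stack seen count = loopB n rest seen count := by
  rw [loopB.eq_def]
  split
  · next heq => rw [h] at heq; cases heq
  · next c' rest' heq =>
    rw [h] at heq
    obtain ⟨rfl, rfl⟩ := by simpa using heq
    rw [if_neg hds]

theorem loopB_eq (n : Int) (R : List Cell) (hRnd : R.Nodup) (hR : ∀ c, c ∈ R ↔ Reach n c) :
    ∀ stack seen count, IB n stack seen →
      loopB n stack seen count =
        count + ((R.filter (fun e => decide (e ∉ seen) || decide (e ∈ stack))).length : Int) := by
  intro stack seen count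
  induction stack, seen, count using loopB.induct (n := n) with
  | case1 stack seen count hpop =>
    intro hIB
    have hnil : stack = [] := pop?_none hpop
    subst hnil
    rw [loopB_pop_none hpop]
    have hfil : R.filter (fun e => decide (e ∉ seen) || decide (e ∈ ([] : List Cell))) = [] := by
      apply List.filter_eq_nil_iff.mpr
      intro e heR
      have hseen : e ∈ seen :=
        reach_mem_closed hIB.2.2.2.1 (fun d hd hok => hIB.2.2.2.2.2 d hd (by simp) hok) e
          ((hR e).mp heR)
      simp [hseen]
    rw [hfil]
    simp
  | case2 stack seen count c rest hpop hds fs ih =>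
    intro hIB
    obtain ⟨hnd, hsub, hsnd, hzero, hI5, hI6⟩ := hIB
    have hst : stack = rest ++ [c] := pop?_some hpop
    have hcstack : c ∈ stack := by simp [hst]
    have hcseen : c ∈ seen := hsub c hcstack
    have hcinb : inbP n c := (hI5 c hcseen).1
    have hrestnd : rest.Nodup := by
      rw [hst] at hnd
      exact hnd.of_append_left
    have hcrest : c ∉ rest := by
      rw [hst] at hnd
      intro hcr
      exact List.disjoint_of_nodup_append hnd hcr (by simp)
    have hcok : okC c := (okC_iff hcinb.1 hcinb.2.2.1).mp hds
    have hcReach : Reach n c := (hI5 c hcseen).2 hcok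
    have hcR : c ∈ R := (hR c).mpr hcReach
    obtain ⟨new, heq, hnewnd, hprop, hcompl⟩ := foldB_spec n (nbrsB c.1 c.2) (rest, seen)
    have hnew : ∀ d ∈ new, d ∉ seen ∧ inbP n d ∧ d ∈ nbrsOf c := by
      intro d hd
      obtain ⟨h1, h2, h3⟩ := hprop d hd
      exact ⟨h1, h2, by rw [← nbrsB_eq]; exact h3⟩
    have hcomplc : ∀ d ∈ nbrsOf c, inbP n d → d ∈ seen ++ new := by
      intro d hd hdi
      exact hcompl d (by rw [nbrsB_eq]; exact hd) hdi
    have hfs : fs = (rest ++ new, seen ++ new) := heq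
    rw [hfs] at ih
    have hIBfs : IB n (rest ++ new) (seen ++ new) := by
      have hdisj : ∀ d ∈ new, d ∉ seen := fun d hd => (hnew d hd).1
      refine ⟨?_, ?_, ?_, ?_, ?_, ?_⟩
      · exact hrestnd.append hnewnd (fun a ha hb => hdisj a hb (hsub a (by simp [hst, ha])))
      · intro e he
        rcases List.mem_append.mp he with h1 | h1
        · exact List.mem_append_left _ (hsub e (by simp [hst, h1]))
        · exact List.mem_append_right _ h1
      · exact hsnd.append hnewnd (fun a ha hb => hdisj a hb ha)
      · exact List.mem_append_left _ hzero
      · intro e he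
        rcases List.mem_append.mp he with h1 | h1
        · obtain ⟨hi, hr⟩ := hI5 e h1
          exact ⟨hi, fun hok => hr hok⟩
        · obtain ⟨h2, h3, h4⟩ := hnew e h1
          exact ⟨h3, fun hok => Reach.step hcReach h4 h3 hok⟩
      · intro e he hestk heok
        have henew : e ∉ new := fun hn => hestk (List.mem_append_right _ hn)
        have herest : e ∉ rest := fun hn => hestk (List.mem_append_left _ hn)
        have hemem : e ∈ seen := by
          rcases List.mem_append.mp he with h1 | h1
          · exact h1
          · exact absurd h1 henew
        by_cases hec : e = c
        · subst hec
          intro d hd hdi hdo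
          exact hcomplc d hd hdi
        · have hestack : e ∉ stack := by
            rw [hst]
            simp only [List.mem_append, List.mem_singleton]
            rintro (h1 | h1)
            · exact herest h1
            · exact hec h1
          intro d hd hdi hdo
          exact List.mem_append_left _ (hI6 e hemem hestack heok d hd hdi hdo)
    rw [loopB_pop_ok hpop hds, heq, ih hIBfs]
    have hlen : (R.filter (fun e => decide (e ∉ seen) || decide (e ∈ stack))).length =
        (R.filter (fun e => decide (e ∉ seen ++ new) || decide (e ∈ rest ++ new))).length + 1 := by
      apply filter_length_flip _ _ hRnd c hcR
      · simp [hcstack]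
      · have hcnew : c ∉ new := fun hn => (hnew c hn).1 hcseen
        simp [hcseen, hcrest, hcnew]
      · intro e heR hec
        by_cases hesn : e ∈ seen
        · have h1 : e ∈ stack ↔ e ∈ rest ++ new := by
            rw [hst]
            simp only [List.mem_append, List.mem_singleton]
            constructor
            · rintro (h2 | h2)
              · exact Or.inl h2
              · exact absurd h2 hec
            · rintro (h2 | h2)
              · exact Or.inl h2
              · exact absurd ((hnew e h2).1) (fun hh => hh hesn)
          simp [hesn, h1]
        · have h2 : e ∉ seen := hesn
          by_cases henew : e ∈ new
          · simp [henew]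
            exact Or.inl h2
          · have h3 : e ∉ seen ++ new := by
              simp only [List.mem_append]
              rintro (h4 | h4)
              · exact hesn h4
              · exact henew h4
            simp [h2, h3]
    rw [hlen]
    push_cast
    ring
  | case3 stack seen count c rest hpop hds ih =>
    intro hIB
    obtain ⟨hnd, hsub, hsnd, hzero, hI5, hI6⟩ := hIB
    have hst : stack = rest ++ [c] := pop?_some hpop
    have hcstack : c ∈ stack := by simp [hst]
    have hcseen : c ∈ seen := hsub c hcstack
    have hcinb : inbP n c := (hI5 c hcseen).1
    have hrestnd : rest.Nodup := by
      rw [hst] at hnd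
      exact hnd.of_append_left
    have hcok : ¬ okC c := fun hok => hds ((okC_iff hcinb.1 hcinb.2.2.1).mpr hok)
    have hIBr : IB n rest seen := by
      refine ⟨hrestnd, fun e he => hsub e (by simp [hst, he]), hsnd, hzero, hI5, ?_⟩
      intro e he her heok
      by_cases hec : e = c
      · subst hec
        exact absurd heok hcok
      · have hestack : e ∉ stack := by
          rw [hst]
          simp only [List.mem_append, List.mem_singleton]
          rintro (h1 | h1)
          · exact her h1
          · exact hec h1
        exact hI6 e he hestack heok
    rw [loopB_pop_no hpop hds, ih hIBr]
    have hfe : R.filter (fun e => decide (e ∉ seen) || decide (e ∈ rest)) =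
        R.filter (fun e => decide (e ∉ seen) || decide (e ∈ stack)) := by
      apply List.filter_congr
      intro e heR
      have hec : e ≠ c := by
        rintro rfl
        exact hcok (reach_ok ((hR e).mp heR))
      have h1 : e ∈ rest ↔ e ∈ stack := by
        rw [hst]
        simp only [List.mem_append, List.mem_singleton]
        constructor
        · exact fun h2 => Or.inl h2
        · rintro (h2 | h2)
          · exact h2
          · exact absurd h2 hec
      simp [h1]
    rw [hfe]

-- ===== VERDICT (by name: the statement is the Claim_ definition above) =====
theorem range_of_motion_of_robert_spec : Claim_equal_range_of_motion_of_robert := by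
  intro board _dom
  unfold Spec_range_of_motion_of_robert
  by_cases hb : board = []
  · subst hb
    rfl
  · simp only [range_of_motion_of_robert, range_of_motion_of_robert_alt]
    rw [dif_neg hb, if_neg hb]
    set q := btA (board.length : Int) ((0 : Int), (0 : Int)) (PySem.Set.empty, PySem.Set.empty)
      ⟨inb_zero hb, fun _ => Reach.base (inb_zero hb) ok_zero, invA_empty _⟩ with hq
    obtain ⟨h1, h2, hinv, hx0, hclo⟩ := q.property
    have hmem : ∀ e, e ∈ q.val.1 ↔ Reach (board.length : Int) e := by
      intro e
      constructor
      · exact fun he => hinv.2.1 e he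
      · intro hre
        have hcl : ∀ d ∈ q.val.1, okC d → Closed1 (board.length : Int) d q.val.1 := by
          intro d hd _
          rcases hclo d hd with h | h
          · simp [PySem.Set.empty] at h
          · exact h
        exact reach_mem_closed (hx0 ok_zero) hcl e hre
    have hseen0 : PySem.Set.ofList [((0 : Int), (0 : Int))] = [((0 : Int), (0 : Int))] := rfl
    have hIB0 : IB (board.length : Int) [((0 : Int), (0 : Int))]
        (PySem.Set.ofList [((0 : Int), (0 : Int))]) := by
      rw [hseen0]
      refine ⟨by simp, by simp, by simp, by simp, ?_, ?_⟩
      · intro e he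
        simp only [List.mem_singleton] at he
        subst he
        exact ⟨inb_zero hb, fun _ => Reach.base (inb_zero hb) ok_zero⟩
      · intro e he hes
        simp only [List.mem_singleton] at he
        subst he
        simp at hes
    rw [loopB_eq (board.length : Int) q.val.1 hinv.2.2 hmem _ _ 0 hIB0]
    have hfil : q.val.1.filter (fun e => decide (e ∉ PySem.Set.ofList [((0 : Int), (0 : Int))]) ||
        decide (e ∈ [((0 : Int), (0 : Int))])) = q.val.1 := by
      apply List.filter_eq_self.mpr
      intro e heR
      by_cases he0 : e = ((0 : Int), (0 : Int))
      · subst he0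
        simp
      · rw [hseen0]
        simp [he0]
    rw [hfil]
    show some (PySem.Set.len q.val.1) = some (0 + (q.val.1.length : Int))
    simp [PySem.Set.len]
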